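-- pv_equiv track=rewrite | github.com/Andrew-Hogan/image-atlas | image_atlas/inspectors.py | are_edge_distances_circle
-- ===== SOURCE A (Python) =====
-- import math
--
-- EDGE_SHAPE_DISTANCE_CUTOFF = 5
--
-- def are_edge_distances_circle(center_distances, edge_cutoff=EDGE_SHAPE_DISTANCE_CUTOFF):
--     if not center_distances:
--         return False, 0
--     max_pixel_distance = max(center_distances)
--     distance_cutoff = max_pixel_distance - edge_cutoff
--     number_past_cutoff = len([pixel_distance for pixel_distance in center_distances
--                               if pixel_distance > distance_cutoff])
--     if number_past_cutoff > (distance_cutoff * math.pi * edge_cutoff):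
--         return True, max_pixel_distance
--     return False, max_pixel_distance
-- ===== SOURCE B (Python) =====
-- import math
--
-- EDGE_SHAPE_DISTANCE_CUTOFF = 5
--
-- def are_edge_distances_circle(center_distances, edge_cutoff=EDGE_SHAPE_DISTANCE_CUTOFF):
--     if not center_distances:
--         return False, 0
--     ordered = sorted(center_distances)
--     peak = ordered[-1]
--     gap = peak - edge_cutoff
--     tally = 0
--     i = len(ordered) - 1
--     while i >= 0 and ordered[i] > gap:
--         tally += 1
--         i -= 1
--     return tally > gap * math.pi * edge_cutoff, peak
-- ===== Notes on version B (the rewrite author's own statement) =====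
-- stated objective: alternative
-- what changed: B sorts the distances once, reads the maximum as the last sorted element, and counts elements past the cutoff by walking down from the top of the sorted list, stopping at the first element at or below the cutoff, instead of taking max() and building a full filtered list; the threshold comparison is unchanged.
import Mathlib
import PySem

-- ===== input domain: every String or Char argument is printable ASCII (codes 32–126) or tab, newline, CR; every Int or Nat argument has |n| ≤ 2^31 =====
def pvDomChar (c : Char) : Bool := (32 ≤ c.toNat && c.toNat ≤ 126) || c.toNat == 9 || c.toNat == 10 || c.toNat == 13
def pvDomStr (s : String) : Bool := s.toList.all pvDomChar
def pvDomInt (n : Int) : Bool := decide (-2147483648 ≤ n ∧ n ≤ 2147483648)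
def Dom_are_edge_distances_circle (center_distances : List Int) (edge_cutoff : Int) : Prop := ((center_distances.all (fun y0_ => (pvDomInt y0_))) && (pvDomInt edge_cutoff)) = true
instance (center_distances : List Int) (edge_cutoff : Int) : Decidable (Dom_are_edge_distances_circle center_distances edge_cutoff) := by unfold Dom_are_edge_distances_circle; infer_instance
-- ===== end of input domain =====

-- B sorts once and counts past-cutoff elements by walking down from the top of the
-- sorted list instead of max() plus a full filtered-list comprehension (objective:
-- alternative decomposition, same results).

-- ===== PORT A =====
-- A evaluates `number_past_cutoff > distance_cutoff * math.pi * edge_cutoff` in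
-- IEEE-754 double arithmetic.  Doubles arising here are dyadic rationals m·2^e;
-- pvFlnorm is round-to-nearest-even to a 53-bit significand (exact in this exponent
-- range: no overflow/underflow/subnormals for |ints| ≤ 2^31), pvFlmul is IEEE
-- multiplication, pvPiD is the exact value of math.pi, and pvGtPi is Python's exact
-- int-vs-float comparison.
def pvFlnorm (m : Int) (e : Int) : Int × Int :=
  let a := m.natAbs
  if a < 2 ^ 53 then (m, e)
  else
    let s := a.log2 - 52
    let q := a >>> s
    let r := a % 2 ^ s
    let h := 2 ^ (s - 1)
    let q' := if h < r ∨ (r = h ∧ q % 2 = 1) then q + 1 else q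
    ((if m < 0 then -(q' : Int) else (q' : Int)), e + (s : Int))

def pvFlmul (x y : Int × Int) : Int × Int := pvFlnorm (x.1 * y.1) (x.2 + y.2)

def pvPiD : Int × Int := (884279719003555, -48)

def pvGtPi (n d e : Int) : Bool :=
  let t := pvFlmul (pvFlmul (pvFlnorm d 0) pvPiD) (pvFlnorm e 0)
  if 0 ≤ t.2 then decide (t.1 * 2 ^ t.2.toNat < n) else decide (t.1 < n * 2 ^ (-t.2).toNat)

def are_edge_distances_circle (center_distances : List Int) (edge_cutoff : Int) : Bool × Int :=
  match PySem.List.max? center_distances (fun x => x) with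
  | none => (false, 0)
  | some max_pixel_distance =>
    let distance_cutoff := max_pixel_distance - edge_cutoff
    let number_past_cutoff : Int :=
      ((center_distances.filter (fun p => decide (distance_cutoff < p))).length : Int)
    if pvGtPi number_past_cutoff distance_cutoff edge_cutoff then
      (true, max_pixel_distance)
    else
      (false, max_pixel_distance)

-- ===== PORT B =====
-- B's float model of the same Python expression, written independently of A's:
-- pvShrink squeezes a significand below 2^53 one bit at a time, carrying the
-- guard and sticky bits of what fell off; pvRoundUp? is the round-to-nearest-even
-- decision on those bits; pvGt2 compares int n with the double m·2^e branch-free.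
def pvShrink (mag : Nat) (ex : Int) (g st : Bool) : Nat × Int × Bool × Bool :=
  if h : mag < 2 ^ 53 then (mag, ex, g, st)
  else pvShrink (mag / 2) (ex + 1) (mag % 2 == 1) (st || g)
termination_by mag
decreasing_by omega

def pvRoundUp? (q : Nat) (g st : Bool) : Bool := g && (st || q % 2 == 1)

def pvNorm2 (m : Int) (e : Int) : Int × Int :=
  let z := pvShrink m.natAbs e false false
  let q := if pvRoundUp? z.1 z.2.2.1 z.2.2.2 then z.1 + 1 else z.1
  ((if m < 0 then -(q : Int) else (q : Int)), z.2.1)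

def pvFmul2 (x y : Int × Int) : Int × Int := pvNorm2 (x.1 * y.1) (x.2 + y.2)

def pvGt2 (n : Int) (t : Int × Int) : Bool :=
  decide (t.1 * 2 ^ t.2.toNat < n * 2 ^ (-t.2).toNat)

-- B's while loop: walk the sorted list from the top, counting while > the cutoff.
def pvTopRun (l : List Int) (c : Int) : Int :=
  match l with
  | [] => 0
  | x :: xs => if c < x then 1 + pvTopRun xs c else 0

def are_edge_distances_circle_alt (center_distances : List Int) (edge_cutoff : Int) : Bool × Int :=
  match center_distances with
  | [] => (false, 0)
  | _ :: _ =>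
    let ordered := PySem.List.sorted center_distances (fun v => v) false
    let peak := (PySem.List.pyGet? ordered (-1)).getD 0
    let gap := peak - edge_cutoff
    let tally := pvTopRun ordered.reverse gap
    (pvGt2 tally (pvFmul2 (pvFmul2 (pvNorm2 gap 0) (884279719003555, -48)) (pvNorm2 edge_cutoff 0)), peak)

-- ===== PRECONDITION & SPEC =====
def Spec_are_edge_distances_circle (center_distances : List Int) (edge_cutoff : Int) (out : Bool × Int) : Prop := out = are_edge_distances_circle_alt center_distances edge_cutoff
instance (center_distances : List Int) (edge_cutoff : Int) (out : Bool × Int) : Decidable (Spec_are_edge_distances_circle center_distances edge_cutoff out) := by unfold Spec_are_edge_distances_circle; infer_instance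

-- ===== CLAIM (what is proved, stated in full; the proofs are below) =====
def Claim_equal_are_edge_distances_circle : Prop := ∀ (center_distances : List Int) (edge_cutoff : Int), Dom_are_edge_distances_circle center_distances edge_cutoff → Spec_are_edge_distances_circle center_distances edge_cutoff (are_edge_distances_circle center_distances edge_cutoff)

-- ===== LEMMAS AND PROOFS =====

-- log2 steps down across a halving.
theorem pv_log2_div2 (a : Nat) (h : 2 ≤ a) : a.log2 = (a / 2).log2 + 1 := by
  have hne : a / 2 ≠ 0 := by omega
  have h1 : 2 ^ (a / 2).log2 ≤ a / 2 := Nat.log2_self_le hne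
  have h2 : a / 2 < 2 ^ ((a / 2).log2 + 1) := Nat.lt_log2_self
  have p1 : 2 ^ ((a / 2).log2 + 1) = 2 * 2 ^ (a / 2).log2 := by rw [pow_succ]; ring
  have p2 : 2 ^ ((a / 2).log2 + 2) = 2 * 2 ^ ((a / 2).log2 + 1) := by rw [pow_succ _ ((a / 2).log2 + 1)]; ring
  have hlo : (a / 2).log2 + 1 ≤ a.log2 := (Nat.le_log2 (by omega)).mpr (by omega)
  have hhi : a.log2 < (a / 2).log2 + 2 := (Nat.log2_lt (by omega)).mpr (by omega)
  omega

-- pvShrink computed in closed form: quotient, exponent shift, guard bit, sticky bit.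
theorem pvShrink_spec (a : Nat) :
    ∀ (e : Int) (g st : Bool), 2 ^ 53 ≤ a →
    pvShrink a e g st =
      (a / 2 ^ (a.log2 - 52), e + ((a.log2 - 52 : Nat) : Int),
       a / 2 ^ (a.log2 - 53) % 2 == 1,
       st || g || decide (a % 2 ^ (a.log2 - 53) ≠ 0)) := by
  induction a using Nat.strong_induction_on with
  | _ a ih =>
    intro e g st ha
    have hnot : ¬ a < 2 ^ 53 := by omega
    rw [pvShrink]
    simp only [hnot, dite_false]
    by_cases h2 : a / 2 < 2 ^ 53
    · -- one step: a < 2^54, log2 a = 53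
      have hlt : a < 2 ^ 54 := by omega
      have hlog : a.log2 = 53 := by
        have h1 : 53 ≤ a.log2 := (Nat.le_log2 (by omega)).mpr ha
        have h3 : a.log2 < 54 := (Nat.log2_lt (by omega)).mpr hlt
        omega
      rw [pvShrink]
      simp only [h2, dite_true]
      simp [hlog]
      exact fun hh => absurd (Nat.mod_one a) hh
    · -- recurse on a/2
      have ha2 : 2 ^ 53 ≤ a / 2 := by omega
      have hlog : a.log2 = (a / 2).log2 + 1 := pv_log2_div2 a (by omega)
      have hL : 53 ≤ (a / 2).log2 := (Nat.le_log2 (by omega)).mpr ha2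
      rw [ih (a / 2) (by omega) (e + 1) (a % 2 == 1) (st || g) ha2]
      set L := (a / 2).log2 with hLdef
      have e1 : a / 2 / 2 ^ (L - 52) = a / 2 ^ (a.log2 - 52) := by
        rw [Nat.div_div_eq_div_mul, hlog]
        congr 1
        rw [← pow_succ']
        congr 1
        omega
      have e2 : e + 1 + ((L - 52 : Nat) : Int) = e + ((a.log2 - 52 : Nat) : Int) := by
        rw [hlog]
        have h52 : 52 ≤ L := by omega
        push_cast [Nat.sub_add_comm h52]
        omega
      have e3 : a / 2 / 2 ^ (L - 53) = a / 2 ^ (a.log2 - 53) := by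
        rw [Nat.div_div_eq_div_mul, hlog]
        congr 1
        rw [← pow_succ']
        congr 1
        omega
      have e4 : (st || g || ((a % 2 == 1) || decide (a / 2 % 2 ^ (L - 53) ≠ 0)))
          = (st || g || decide (a % 2 ^ (a.log2 - 53) ≠ 0)) := by
        have hmod : a % 2 ^ (a.log2 - 53) = a % 2 + 2 * (a / 2 % 2 ^ (L - 53)) := by
          rw [hlog]
          have : 2 ^ (L + 1 - 53) = 2 * 2 ^ (L - 53) := by
            rw [← pow_succ']
            congr 1
            omega
          rw [this, Nat.mod_mul]
        congr 1
        rw [hmod]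
        have h01 : a % 2 = 0 ∨ a % 2 = 1 := by omega
        rcases h01 with h0 | h0 <;> rw [h0]
        · simp
        · simp
      rw [e1, e2, e3]
      rw [show ((st || g) || (a % 2 == 1) || decide (a / 2 % 2 ^ (L - 53) ≠ 0))
            = (st || g || ((a % 2 == 1) || decide (a / 2 % 2 ^ (L - 53) ≠ 0))) by
            simp [Bool.or_assoc], e4]

-- B's squeeze-and-round normalisation agrees with A's shift-based one.
theorem pvNorm2_eq (m e : Int) : pvNorm2 m e = pvFlnorm m e := by
  unfold pvNorm2 pvFlnorm
  by_cases hlt : m.natAbs < 2 ^ 53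
  · rw [pvShrink]
    simp only [hlt, dite_true]
    simp only [pvRoundUp?, Bool.false_and, Bool.false_eq_true, if_false]
    rcases Int.natAbs_eq m with hm | hm
    · have hnn : ¬ m < 0 := by omega
      simp [hnn, ← hm]
    · by_cases hneg : m < 0
      · simp only [hneg, if_true]
        rw [← hm]
      · have : m = 0 := by omega
        simp [this]
  · have ha : 2 ^ 53 ≤ m.natAbs := by omega
    rw [pvShrink_spec m.natAbs e false false ha]
    simp only [hlt, if_false]
    set a := m.natAbs with hadef
    set s := a.log2 - 52 with hsdef
    have hs1 : 1 ≤ s := by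
      have : 53 ≤ a.log2 := (Nat.le_log2 (by omega)).mpr ha
      omega
    have hsm1 : a.log2 - 53 = s - 1 := by omega
    have hsplit : 2 ^ s = 2 ^ (s - 1) * 2 := by
      rw [← pow_succ]
      congr 1
      omega
    set h1 := 2 ^ (s - 1) with hh1
    have hh1pos : 0 < h1 := Nat.two_pow_pos _
    -- guard bit = (a % 2^s) / h1, sticky = (a % 2^s) % h1
    have hguard : a / h1 % 2 = a % 2 ^ s / h1 := by
      rw [hsplit, Nat.mod_mul_right_div_self]
    have hsticky : a % h1 = a % 2 ^ s % h1 := by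
      rw [Nat.mod_mod_of_dvd a ⟨2, hsplit⟩]
    set r := a % 2 ^ s with hr
    set q := a >>> s with hq
    have hqdiv : q = a / 2 ^ s := Nat.shiftRight_eq_div_pow a s
    have hrlt : r < h1 * 2 := by
      rw [hr, ← hsplit]
      exact Nat.mod_lt _ (by positivity)
    have hu : r / h1 = 0 ∨ r / h1 = 1 := by
      have : r / h1 < 2 := (Nat.div_lt_iff_lt_mul hh1pos).mpr (by omega)
      omega
    have hvu : h1 * (r / h1) + r % h1 = r := Nat.div_add_mod r h1
    have hvlt : r % h1 < h1 := Nat.mod_lt _ hh1pos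
    -- the two rounding decisions agree
    have hcond : pvRoundUp? (a / 2 ^ s) (a / h1 % 2 == 1) (decide (a % h1 ≠ 0))
        = decide (h1 < r ∨ (r = h1 ∧ q % 2 = 1)) := by
      rw [hguard, hsticky, ← hqdiv]
      unfold pvRoundUp?
      rcases hu with h0 | h0 <;> rw [h0] at hvu ⊢
      · have hle : r < h1 := by omega
        have c1 : ¬ (h1 < r ∨ (r = h1 ∧ q % 2 = 1)) := by
          rintro (h | ⟨h, _⟩) <;> omega
        simp [c1]
      · have hge : r = h1 + r % h1 := by omega
        by_cases hv : r % h1 = 0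
        · by_cases hodd : q % 2 = 1
          · have c1 : (h1 < r ∨ (r = h1 ∧ q % 2 = 1)) := by right; omega
            simp only [hv, hodd]
            simp
            omega
          · have c1 : ¬ (h1 < r ∨ (r = h1 ∧ q % 2 = 1)) := by
              rintro (h | ⟨h, h'⟩) <;> omega
            have : q % 2 = 0 := by omega
            simp only [hv, this]
            simp
            omega
        · have c1 : (h1 < r ∨ (r = h1 ∧ q % 2 = 1)) := by left; omega
          simp [hv, c1]
    simp only [Bool.false_or]
    rw [hsm1, ← hh1, hcond, hqdiv]
    simp only [decide_eq_true_eq]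

-- B's branch-free comparison against A's sign-split one, through the shared product.
theorem pvGt2_eq (n d e : Int) :
    pvGt2 n (pvFmul2 (pvFmul2 (pvNorm2 d 0) (884279719003555, -48)) (pvNorm2 e 0))
      = pvGtPi n d e := by
  have hm : ∀ x y : Int × Int, pvFmul2 x y = pvFlmul x y := by
    intro x y
    simp [pvFmul2, pvFlmul, pvNorm2_eq]
  rw [pvNorm2_eq, pvNorm2_eq, hm, hm]
  show pvGt2 n (pvFlmul (pvFlmul (pvFlnorm d 0) pvPiD) (pvFlnorm e 0)) = _
  unfold pvGt2 pvGtPi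
  set t := pvFlmul (pvFlmul (pvFlnorm d 0) pvPiD) (pvFlnorm e 0)
  by_cases h : 0 ≤ t.2
  · have h0 : (-t.2).toNat = 0 := by omega
    simp [h, h0]
  · have h0 : t.2.toNat = 0 := by omega
    rw [if_neg h, h0]
    simp

-- On a nonincreasing list, counting the leading elements > c counts ALL elements > c.
theorem pvTopRun_eq_countP (c : Int) :
    ∀ (l : List Int), l.Pairwise (fun a b => b ≤ a) →
      pvTopRun l c = ((l.countP (fun p => decide (c < p))) : Int) := by
  intro l
  induction l with
  | nil => intro _; simp [pvTopRun]
  | cons x xs ih =>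
    intro hp
    rw [List.pairwise_cons] at hp
    by_cases hx : c < x
    · simp [pvTopRun, hx, ih hp.2]
      omega
    · have hall : (x :: xs).countP (fun p => decide (c < p)) = 0 := by
        rw [List.countP_eq_zero]
        intro y hy
        simp only [decide_eq_true_eq]
        rcases List.mem_cons.mp hy with h | h
        · omega
        · have := hp.1 y h
          omega
      simp [pvTopRun, hx, hall]

theorem are_edge_distances_circle_spec : Claim_equal_are_edge_distances_circle := by
  intro cd ec _
  unfold Spec_are_edge_distances_circle
  cases cd with
  | nil => rfl
  | cons x xs =>
    -- A's max
    have hmax : PySem.List.max? (x :: xs) (fun x => x) = some (xs.foldl max x) :=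
      PySem.List.max?_id_cons x xs
    set mx := xs.foldl max x with hmx
    have hmem : mx ∈ x :: xs := PySem.List.max?_mem hmax
    have hisMax : ∀ y ∈ x :: xs, y ≤ mx := PySem.List.max?_isMax hmax
    -- the sorted list and its reverse
    set srt := PySem.List.sorted (x :: xs) (fun v => v) false with hsrt
    have hperm : srt.Perm (x :: xs) := PySem.List.sorted_perm _ _ _
    have hpw : srt.Pairwise (fun a b => a ≤ b) := PySem.List.sorted_pairwise _ _
    have hpwrev : srt.reverse.Pairwise (fun a b => b ≤ a) := by
      rw [List.pairwise_reverse]; exact hpw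
    have hne : srt ≠ [] := by
      intro h
      rw [PySem.List.sorted_eq_nil_iff] at h
      exact List.cons_ne_nil x xs h
    cases hrev : srt.reverse with
    | nil =>
      exact absurd (by simpa using congrArg List.reverse hrev) hne
    | cons m t =>
      -- B's max: last of srt = head of srt.reverse = m, and m = mx
      have hlast : PySem.List.pyGet? srt (-1) = some m := by
        rw [PySem.List.pyGet?_neg_one, ← List.head?_reverse, hrev]; rfl
      have hm_mem : m ∈ x :: xs := hperm.mem_iff.mp (by
        have : m ∈ srt.reverse := by rw [hrev]; exact List.mem_cons_self
        simpa using this)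
      have hmx_mem_rev : mx ∈ m :: t := by
        rw [← hrev]
        simpa using hperm.mem_iff.mpr hmem
      have hge : ∀ y ∈ t, y ≤ m := by
        have := hpwrev
        rw [hrev, List.pairwise_cons] at this
        exact this.1
      have hme : m = mx := by
        have h1 : m ≤ mx := hisMax m hm_mem
        have h2 : mx ≤ m := by
          rcases List.mem_cons.mp hmx_mem_rev with h | h
          · omega
          · exact hge mx h
        omega
      -- the counts agree
      have hcnt : pvTopRun srt.reverse (mx - ec) =
          (((x :: xs).filter (fun p => decide (mx - ec < p))).length : Int) := by
        rw [pvTopRun_eq_countP _ _ hpwrev]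
        congr 1
        rw [List.countP_reverse]
        rw [hperm.countP_eq]
        exact List.countP_eq_length_filter
      -- assemble
      show are_edge_distances_circle (x :: xs) ec = _
      unfold are_edge_distances_circle are_edge_distances_circle_alt
      rw [hmax]
      simp only [← hsrt, hlast, Option.getD_some]
      rw [hme, hcnt, pvGt2_eq]
      cases pvGtPi (((x :: xs).filter (fun p => decide (mx - ec < p))).length : Int) (mx - ec) ec <;> simp
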